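-- pv_equiv track=rewrite | github.com/evg-n/algorithms-yandex-praktikum | sprint_8/g_shift_search.py | find
-- ===== SOURCE A (Python) =====
-- def is_equal(shift, a, b):
--     # a[i] + shift == b[i]
--     return list(map(lambda item: item + shift, a)) == b
--
-- def find_index(template, numbers, start=0):
--     for i in range(start, len(numbers) - len(template) + 1):
--         shift = template[0] - numbers[i]
--         if is_equal(shift, numbers[i : i + len(template)], template):
--             return i
--     return -1
--
-- def find(template, numbers):
--     # cycle with search positions
--     start = 0
--     results = []
--     while True:
--         result = find_index(template, numbers, start)
--         if result == -1:
--             break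
--         start = result + 1
--         results.append(start)
--
--     return results
-- ===== SOURCE B (Python) =====
-- def find(template, numbers):
--     # Shift-invariant matching via consecutive-difference sequences:
--     # a window matches template up to a constant shift iff their difference
--     # sequences are equal, so compare differences once instead of re-shifting.
--     m, n = len(template), len(numbers)
--     dt = [b - a for a, b in zip(template, template[1:])]
--     dn = [b - a for a, b in zip(numbers, numbers[1:])]
--     return [i + 1 for i in range(n - m + 1) if dn[i:i + m - 1] == dt]
-- ===== Notes on version B (the rewrite author's own statement) =====
-- stated objective: alternative
-- what changed: B replaces A's restarting while-loop of shift-and-compare window checks with a single comprehension that precomputes the consecutive-difference sequences of template and numbers once and collects every position whose difference window equals the template's difference sequence; Pre_ only excludes the empty template, on which A raises IndexError.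
import Mathlib
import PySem

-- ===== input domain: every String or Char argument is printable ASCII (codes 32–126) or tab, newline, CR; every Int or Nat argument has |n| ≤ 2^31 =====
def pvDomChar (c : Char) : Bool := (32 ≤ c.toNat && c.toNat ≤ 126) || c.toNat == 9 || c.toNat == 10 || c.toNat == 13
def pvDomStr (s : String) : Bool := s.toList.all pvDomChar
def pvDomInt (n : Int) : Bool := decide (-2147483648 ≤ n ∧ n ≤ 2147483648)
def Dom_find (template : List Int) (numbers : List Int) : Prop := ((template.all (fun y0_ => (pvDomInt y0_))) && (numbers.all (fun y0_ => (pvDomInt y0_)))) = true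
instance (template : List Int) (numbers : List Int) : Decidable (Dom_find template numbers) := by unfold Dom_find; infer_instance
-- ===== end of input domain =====

-- B computes the consecutive-difference sequences once and matches them in one
-- pass, instead of A's while-loop restarting a shift-and-compare scan
-- (alternative structure, same asymptotic cost).

-- ===== PORT A =====
def isEqual (shift : Int) (a b : List Int) : Bool :=
  a.map (fun item => item + shift) == b

def findIndexGo (template numbers : List Int) : List Int → Int
  | [] => -1
  | i :: rest =>
    let shift := PySem.List.pyGetD template 0 0 - PySem.List.pyGetD numbers i 0
    if isEqual shift (PySem.List.slice numbers (some i) (some (i + (template.length : Int)))) template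
    then i
    else findIndexGo template numbers rest

def find_index (template numbers : List Int) (start : Int) : Int :=
  findIndexGo template numbers
    (PySem.List.pyRange start ((numbers.length : Int) - (template.length : Int) + 1) 1)

def findLoop (template numbers : List Int) : Nat → Int → List Int → List Int
  | 0, _, results => results   -- fuel guard only; never reached with the fuel `find` supplies
  | fuel + 1, start, results =>
    let result := find_index template numbers start
    if result = -1 then results
    else findLoop template numbers fuel (result + 1) (results ++ [result + 1])

def find (template : List Int) (numbers : List Int) : List Int :=
  findLoop template numbers (numbers.length + 2) 0 []

-- ===== PORT B =====
def diffs (xs : List Int) : List Int :=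
  (xs.zip xs.tail).map (fun p => p.2 - p.1)

def find_alt (template : List Int) (numbers : List Int) : List Int :=
  let m : Int := template.length
  let n : Int := numbers.length
  let dt := diffs template
  let dn := diffs numbers
  ((PySem.List.pyRange 0 (n - m + 1) 1).filter
      (fun i => PySem.List.slice dn (some i) (some (i + m - 1)) == dt)).map
    (fun i => i + 1)

-- ===== PRECONDITION & SPEC =====
-- Pre_ excludes exactly the empty template, on which A raises IndexError (template[0]).
def Pre_find (template : List Int) (numbers : List Int) : Prop := template ≠ []
instance (template : List Int) (numbers : List Int) : Decidable (Pre_find template numbers) := by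
  unfold Pre_find; infer_instance

def pvWitness_find : List Int × List Int := ([1, 3], [0, 2, 4, 1, 3])

def Spec_find (template : List Int) (numbers : List Int) (out : List Int) : Prop :=
  out = find_alt template numbers
instance (template : List Int) (numbers : List Int) (out : List Int) :
    Decidable (Spec_find template numbers out) := by unfold Spec_find; infer_instance

-- ===== CLAIM (what is proved, stated in full; the proofs are below) =====
def Claim_equal_find : Prop :=
  ∀ (template : List Int) (numbers : List Int), Dom_find template numbers →
    Pre_find template numbers → Spec_find template numbers (find template numbers)

-- ===== LEMMAS AND PROOFS =====

-- A's per-position condition, named for the proofs.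
def condA (t nums : List Int) (i : Int) : Bool :=
  isEqual (PySem.List.pyGetD t 0 0 - PySem.List.pyGetD nums i 0)
    (PySem.List.slice nums (some i) (some (i + (t.length : Int)))) t

theorem diffs_cons₂ (x y : Int) (t : List Int) :
    diffs (x :: y :: t) = (y - x) :: diffs (y :: t) := rfl

theorem diffs_tail (xs : List Int) : diffs xs.tail = (diffs xs).tail := by
  match xs with
  | [] => rfl
  | [x] => rfl
  | x :: y :: t => simp [diffs_cons₂]

theorem diffs_drop (k : Nat) (xs : List Int) : diffs (xs.drop k) = (diffs xs).drop k := by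
  induction k generalizing xs with
  | zero => simp
  | succ k ih =>
    rw [← List.tail_drop, ← List.tail_drop, diffs_tail, ih]

theorem diffs_take : ∀ (xs : List Int) (m : Nat), diffs (xs.take m) = (diffs xs).take (m - 1) := by
  intro xs
  induction xs with
  | nil => intro m; simp [diffs]
  | cons x xs ih =>
    intro m
    cases m with
    | zero => simp [diffs]
    | succ m' =>
      cases xs with
      | nil => cases m' <;> simp [diffs]
      | cons y t =>
        cases m' with
        | zero => simp [diffs]
        | succ m'' =>
          have h := ih (m'' + 1)
          simp only [List.take_succ_cons] at h
          simp only [List.take_succ_cons, diffs_cons₂]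
          congr 1

theorem diffs_map_add : ∀ (a : List Int) (s : Int),
    diffs (a.map (fun v => v + s)) = diffs a := by
  intro a s
  induction a with
  | nil => rfl
  | cons x a ih =>
    cases a with
    | nil => rfl
    | cons y t =>
      simp only [List.map_cons] at ih ⊢
      simp only [diffs_cons₂, List.cons.injEq]
      exact ⟨by ring, ih⟩

theorem shift_rev (s : Int) : ∀ (a b : List Int), a.length = b.length → diffs a = diffs b →
    (a = [] ∨ b.headI = a.headI + s) → a.map (fun v => v + s) = b := by
  intro a
  induction a with
  | nil =>
    intro b hl _ _
    cases b with
    | nil => rfl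
    | cons => simp at hl
  | cons x a ih =>
    intro b hl hd hh
    cases b with
    | nil => simp at hl
    | cons y b' =>
      have hy : y = x + s := by
        rcases hh with h | h
        · exact absurd h (by simp)
        · simpa using h
      cases a with
      | nil =>
        cases b' with
        | nil => simp [hy]
        | cons => simp at hl
      | cons x' t =>
        cases b' with
        | nil => simp at hl
        | cons y' t' =>
          simp only [diffs_cons₂, List.cons.injEq] at hd
          obtain ⟨h1, h2⟩ := hd
          have ihr := ih (y' :: t') (by simpa using hl) h2
            (Or.inr (show (y' :: t').headI = (x' :: t).headI + s by simp only [List.headI]; omega))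
          simp only [List.map_cons] at ihr ⊢
          rw [ihr, hy]

theorem shift_iff (w t : List Int) (hl : w.length = t.length) :
    (w.map (fun v => v + (t.headI - w.headI)) = t) ↔ diffs w = diffs t := by
  constructor
  · intro h; rw [← h, diffs_map_add]
  · intro h; exact shift_rev _ w t hl h (Or.inr (by ring))

theorem window_headI (nums : List Int) (k m : Nat) (hm : 0 < m) (hk : k < nums.length) :
    ((nums.drop k).take m).headI = nums.getD k 0 := by
  cases h : nums.drop k with
  | nil =>
    exfalso
    have := congrArg List.length h
    simp at this
    omega
  | cons a l' =>
    have ha : nums[k]? = some a := by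
      have h0 : (nums.drop k).head? = nums[k]? := List.head?_drop
      rw [h] at h0
      simpa using h0.symm
    cases m with
    | zero => omega
    | succ m' =>
      rw [List.take_succ_cons]
      simp [List.getD_eq_getElem?_getD, ha]

theorem condA_eq_condB (t nums : List Int) (ht : t ≠ []) (k : Nat)
    (hk : k + t.length ≤ nums.length) :
    condA t nums (k : Int) =
      (PySem.List.slice (diffs nums) (some (k : Int)) (some ((k : Int) + (t.length : Int) - 1))
        == diffs t) := by
  have hm : 0 < t.length := by
    cases t with
    | nil => exact absurd rfl ht
    | cons a l => simp
  have hkk : k < nums.length := by omega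
  unfold condA isEqual
  rw [show ((k : Int) + (t.length : Int) - 1) = ((k : Int) + ((t.length - 1 : Nat) : Int)) from by
    omega]
  rw [PySem.List.slice_natCast_add, PySem.List.slice_natCast_add]
  rw [PySem.List.pyGetD_natCast, PySem.List.pyGetD_zero]
  have hth : t.getD 0 0 = t.headI := by cases t <;> simp
  rw [hth, ← window_headI nums k t.length hm hkk]
  rw [← diffs_drop, ← diffs_take]
  have hwlen : ((nums.drop k).take t.length).length = t.length := by
    simp only [List.length_take, List.length_drop]
    omega
  rw [Bool.eq_iff_iff]
  simp only [beq_iff_eq]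
  exact shift_iff _ t hwlen

theorem go_cases (t nums : List Int) (N : Nat) : ∀ (start stop : Int), (stop - start).toNat ≤ N →
    (findIndexGo t nums (PySem.List.pyRange start stop 1) = -1 ∧
      (PySem.List.pyRange start stop 1).filter (condA t nums) = []) ∨
    (∃ r, findIndexGo t nums (PySem.List.pyRange start stop 1) = r ∧ start ≤ r ∧ r < stop ∧
      (PySem.List.pyRange start stop 1).filter (condA t nums) =
        r :: (PySem.List.pyRange (r + 1) stop 1).filter (condA t nums)) := by
  induction N with
  | zero =>
    intro start stop hN
    left
    rw [PySem.List.pyRange_one_eq_nil (by omega)]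
    exact ⟨rfl, rfl⟩
  | succ N ih =>
    intro start stop hN
    by_cases h : start < stop
    · rw [PySem.List.pyRange_one_cons h]
      by_cases hc : condA t nums start
      · right
        refine ⟨start, ?_, le_refl _, h, ?_⟩
        · unfold condA at hc
          simp only [findIndexGo]
          simp [hc]
        · rw [List.filter_cons_of_pos hc]
      · have hgo : findIndexGo t nums (start :: PySem.List.pyRange (start + 1) stop 1) =
            findIndexGo t nums (PySem.List.pyRange (start + 1) stop 1) := by
          unfold condA at hc
          simp only [findIndexGo]
          simp [hc]
        have hfil : (start :: PySem.List.pyRange (start + 1) stop 1).filter (condA t nums) =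
            (PySem.List.pyRange (start + 1) stop 1).filter (condA t nums) :=
          List.filter_cons_of_neg (by simpa using hc)
        rcases ih (start + 1) stop (by omega) with ⟨h1, h2⟩ | ⟨r, h1, hr1, hr2, h2⟩
        · left
          rw [hgo, hfil]
          exact ⟨h1, h2⟩
        · right
          exact ⟨r, by rw [hgo]; exact h1, by omega, hr2, by rw [hfil]; exact h2⟩
    · left
      rw [PySem.List.pyRange_one_eq_nil (by omega)]
      exact ⟨rfl, rfl⟩

theorem loop_eq (t nums : List Int) : ∀ (fuel : Nat) (start : Int) (results : List Int),
    0 ≤ start → (((nums.length : Int) - (t.length : Int) + 1) - start).toNat < fuel →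
    findLoop t nums fuel start results =
      results ++
        ((PySem.List.pyRange start ((nums.length : Int) - (t.length : Int) + 1) 1).filter
            (condA t nums)).map (fun i => i + 1) := by
  intro fuel
  induction fuel with
  | zero => intro start results h0 hf; exact absurd hf (Nat.not_lt_zero _)
  | succ fuel ih =>
    intro start results h0 hf
    simp only [findLoop, find_index]
    rcases go_cases t nums (((nums.length : Int) - (t.length : Int) + 1) - start).toNat start
        ((nums.length : Int) - (t.length : Int) + 1) (le_refl _) with
      ⟨h1, h2⟩ | ⟨r, h1, hr1, hr2, h2⟩
    · rw [h1, h2]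
      simp
    · rw [h1, if_neg (by omega), ih (r + 1) (results ++ [r + 1]) (by omega) (by omega), h2]
      simp

-- ===== VERDICT (by name: the statement is the Claim_ definition above) =====
theorem find_spec : Claim_equal_find := by
  intro t nums _ hpre
  unfold Spec_find
  unfold find
  rw [loop_eq t nums (nums.length + 2) 0 [] le_rfl (by omega)]
  simp only [find_alt, List.nil_append]
  congr 1
  apply List.filter_congr
  intro i hi
  rw [PySem.List.mem_pyRange_one] at hi
  obtain ⟨hi0, hi1⟩ := hi
  have hk : ((i.toNat : Nat) : Int) = i := Int.toNat_of_nonneg hi0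
  show condA t nums i =
    (PySem.List.slice (diffs nums) (some i) (some (i + (t.length : Int) - 1)) == diffs t)
  rw [← hk]
  exact condA_eq_condB t nums hpre i.toNat (by omega)
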